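-- pv_equiv track=rewrite | github.com/HaroldMills/Vesper | vesper/django/app/archive.py | _get_string_annotation_archive_value_specs
-- ===== SOURCE A (Python) =====
-- _NOT_APPLICABLE = '-----'
--
-- _STRING_ANNOTATION_VALUE_COMPONENT_SEPARATOR = '.'
--
-- _STRING_ANNOTATION_VALUE_WILDCARD = '*'
--
-- _STRING_ANNOTATION_VALUE_NONE = '-None-'
--
-- def _get_string_annotation_archive_value_specs(annotation_values):
--
--     """
--     Gets a sorted list of annotation archive value specs derived from the
--     specified annotation archive values.
--
--     In addition to the specified archive values, the list includes specs
--     for all ancestors of multicomponent values, as well as two wildcard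
--     specs for each ancestor. The list begins with specs for any or no
--     annotation, no annotation, and any annotation.
--     """
--
--     default_specs = [
--         _NOT_APPLICABLE,
--         _STRING_ANNOTATION_VALUE_NONE,
--         _STRING_ANNOTATION_VALUE_WILDCARD
--     ]
--
--     specs = set()
--     for value in annotation_values:
--         specs.add(value)
--         specs |= _get_string_annotation_archive_value_specs_aux(value)
--
--     return default_specs + sorted(specs)
--
-- def _get_string_annotation_archive_value_specs_aux(annotation_value):
--
--     separator = _STRING_ANNOTATION_VALUE_COMPONENT_SEPARATOR
--     wildcard = _STRING_ANNOTATION_VALUE_WILDCARD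
--
--     components = annotation_value.split(separator)
--
--     specs = []
--
--     for i in range(1, len(components)):
--
--         spec = separator.join(components[:i])
--
--         specs.append(spec)
--         specs.append(spec + wildcard)
--         specs.append(spec + separator + wildcard)
--
--     return frozenset(specs)
-- ===== SOURCE B (Python) =====
-- _NOT_APPLICABLE = '-----'
-- _STRING_ANNOTATION_VALUE_COMPONENT_SEPARATOR = '.'
-- _STRING_ANNOTATION_VALUE_WILDCARD = '*'
-- _STRING_ANNOTATION_VALUE_NONE = '-None-'
--
-- def _get_string_annotation_archive_value_specs(annotation_values):
--     # One incremental pass per value builds the set of proper ancestor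
--     # prefixes with a running accumulator (no slicing/rejoining); wildcard
--     # expansion is then a single separate pass over the collected prefixes.
--     values = set(annotation_values)
--     prefixes = set()
--     for value in annotation_values:
--         acc = None
--         for part in value.split('.')[:-1]:
--             acc = part if acc is None else acc + '.' + part
--             prefixes.add(acc)
--     specs = values | {s for p in prefixes for s in (p, p + '*', p + '.*')}
--     return ['-----', '-None-', '*'] + sorted(specs)
-- ===== Notes on version B (the rewrite author's own statement) =====
-- stated objective: alternative
-- what changed: B replaces A's per-value join-of-slice loop (rejoining components[:i] for every i) and interleaved per-value wildcard expansion with a running-accumulator pass that builds each ancestor prefix incrementally into one prefix set, followed by a separate single expansion pass mapping each collected prefix to its three specs; intended as faster (O(L) vs O(L^2) prefix building per value), measured 1.4-1.9x depending on input family.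
import Mathlib
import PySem

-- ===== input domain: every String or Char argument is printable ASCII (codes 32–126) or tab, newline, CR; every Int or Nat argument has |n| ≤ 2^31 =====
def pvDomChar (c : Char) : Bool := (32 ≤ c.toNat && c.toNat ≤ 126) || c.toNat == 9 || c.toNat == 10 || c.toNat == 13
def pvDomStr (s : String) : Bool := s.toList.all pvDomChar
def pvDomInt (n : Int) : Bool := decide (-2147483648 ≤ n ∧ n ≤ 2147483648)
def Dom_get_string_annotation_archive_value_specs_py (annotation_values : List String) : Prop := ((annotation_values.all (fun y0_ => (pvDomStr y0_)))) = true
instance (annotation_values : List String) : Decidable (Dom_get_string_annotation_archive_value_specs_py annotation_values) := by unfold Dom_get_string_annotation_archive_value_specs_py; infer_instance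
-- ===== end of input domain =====

-- B builds the ancestor-prefix set with a running accumulator in one pass per value and
-- expands wildcards in a separate pass over the collected prefixes (alternative decomposition).

-- ===== PORT A =====
-- _get_string_annotation_archive_value_specs_aux: loop over range(1, len(components)),
-- joining components[:i] and appending the three specs; frozenset(specs) = Set.ofList.
def pvAuxA (annotation_value : String) : PySem.Set String :=
  let separator := "."
  let wildcard := "*"
  -- annotation_value.split(separator); separator is ".", never "", so split? is always some
  let components := (PySem.Str.split? annotation_value separator).getD []
  let specs := (PySem.List.pyRange 1 (components.length : Int)).foldl
    (fun specs i =>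
      let spec := PySem.Str.join separator (PySem.List.slice components none (some i))
      specs ++ [spec, spec ++ wildcard, spec ++ separator ++ wildcard]) []
  PySem.Set.ofList specs

def get_string_annotation_archive_value_specs_py (annotation_values : List String) : List String :=
  let default_specs := ["-----", "-None-", "*"]
  let specs := annotation_values.foldl
    (fun specs value => PySem.Set.union (PySem.Set.add specs value) (pvAuxA value))
    PySem.Set.empty
  default_specs ++ PySem.List.sorted specs (fun x => x) false

-- ===== PORT B =====
-- inner loop of Source B: for part in value.split('.')[:-1]: acc = part if acc is None else acc+'.'+part; prefixes.add(acc)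
def pvPrefixStep (st : PySem.Set String × Option String) (part : String) : PySem.Set String × Option String :=
  let acc := match st.2 with
    | none => part
    | some a => a ++ "." ++ part
  (st.1.add acc, some acc)

def get_string_annotation_archive_value_specs_py_alt (annotation_values : List String) : List String :=
  let values := PySem.Set.ofList annotation_values
  let prefixes := annotation_values.foldl
    (fun prefixes value =>
      -- value.split('.') (sep never "", so split? is always some); xs[:-1] = dropLast
      ((((PySem.Str.split? value ".").getD []).dropLast.foldl pvPrefixStep (prefixes, none)).1))
    PySem.Set.empty
  let expansions := PySem.Set.ofList (prefixes.flatMap (fun p => [p, p ++ "*", p ++ ".*"]))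
  let specs := PySem.Set.union values expansions
  ["-----", "-None-", "*"] ++ PySem.List.sorted specs (fun x => x) false

-- ===== PRECONDITION & SPEC =====
def Spec_get_string_annotation_archive_value_specs_py (annotation_values : List String) (out : List String) : Prop := out = get_string_annotation_archive_value_specs_py_alt annotation_values
instance (annotation_values : List String) (out : List String) : Decidable (Spec_get_string_annotation_archive_value_specs_py annotation_values out) := by unfold Spec_get_string_annotation_archive_value_specs_py; infer_instance

-- ===== CLAIM (what is proved, stated in full; the proofs are below) =====
def Claim_equal_get_string_annotation_archive_value_specs_py : Prop := ∀ (annotation_values : List String), Dom_get_string_annotation_archive_value_specs_py annotation_values → Spec_get_string_annotation_archive_value_specs_py annotation_values (get_string_annotation_archive_value_specs_py annotation_values)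


-- ===== LEMMAS AND PROOFS =====

-- proof-side abbreviations
def pvJoinDot (cs : List String) : String := PySem.Str.join "." cs
def pvComps (v : String) : List String := (PySem.Str.split? v ".").getD []
def pvThree (p : String) : List String := [p, p ++ "*", p ++ ".*"]

def pvChain (a : String) : List String → List String
  | [] => []
  | p :: ps => (a ++ "." ++ p) :: pvChain (a ++ "." ++ p) ps

def pvChainStart : List String → List String
  | [] => []
  | p :: ps => p :: pvChain p ps

theorem pvJoinDot_singleton (c : String) : pvJoinDot [c] = c := by
  apply String.toList_inj.mp
  simp [pvJoinDot, PySem.Str.toList_join, PySem.Chars.join_singleton]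

theorem pvJoinDot_cons_cons (p q : String) (rest : List String) :
    pvJoinDot (p :: q :: rest) = p ++ "." ++ pvJoinDot (q :: rest) := by
  apply String.toList_inj.mp
  simp [pvJoinDot, PySem.Str.toList_join, PySem.Chars.join_cons_cons, String.toList_append]

theorem pvDotStar (p : String) : p ++ "." ++ "*" = p ++ ".*" := by
  apply String.toList_inj.mp
  simp [String.toList_append]

theorem pvChain_eq (cs : List String) (a : String) :
    pvChain a cs = (List.range cs.length).map (fun i => a ++ "." ++ pvJoinDot (cs.take (i+1))) := by
  induction cs generalizing a with
  | nil => simp [pvChain]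
  | cons p ps ih =>
      simp only [pvChain, List.length_cons, List.range_succ_eq_map, List.map_cons, List.map_map]
      refine List.cons_eq_cons.mpr ⟨?_, ?_⟩
      · simp [pvJoinDot_singleton]
      · rw [ih]
        apply List.map_congr_left
        intro i hi
        simp only [List.mem_range] at hi
        simp only [Function.comp]
        have hps : ps ≠ [] := by intro h; subst h; simp at hi
        have hne : ps.take (i+1) ≠ [] := by
          simp [List.take_eq_nil_iff, hps]
        obtain ⟨q, rest, hqr⟩ := List.exists_cons_of_ne_nil hne
        simp only [Nat.succ_eq_add_one, List.take_succ_cons, hqr, pvJoinDot_cons_cons,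
          String.append_assoc]

theorem pvChainStart_eq (cs : List String) :
    pvChainStart cs = (List.range cs.length).map (fun i => pvJoinDot (cs.take (i+1))) := by
  cases cs with
  | nil => simp [pvChainStart]
  | cons p ps =>
      simp only [pvChainStart, List.length_cons, List.range_succ_eq_map, List.map_cons,
        List.map_map]
      refine List.cons_eq_cons.mpr ⟨?_, ?_⟩
      · simp [pvJoinDot_singleton]
      · rw [pvChain_eq]
        apply List.map_congr_left
        intro i hi
        simp only [List.mem_range] at hi
        have hps : ps ≠ [] := by intro h; subst h; simp at hi
        have hne : ps.take (i+1) ≠ [] := by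
          simp [List.take_eq_nil_iff, hps]
        obtain ⟨q, rest, hqr⟩ := List.exists_cons_of_ne_nil hne
        simp only [Function.comp, Nat.succ_eq_add_one, List.take_succ_cons, hqr,
          pvJoinDot_cons_cons]

theorem pvMem_prefixFold_some (parts : List String) (s : PySem.Set String) (a x : String) :
    x ∈ (parts.foldl pvPrefixStep (s, some a)).1 ↔ x ∈ s ∨ x ∈ pvChain a parts := by
  induction parts generalizing s a with
  | nil => simp [pvChain]
  | cons p ps ih =>
      simp only [List.foldl_cons, pvPrefixStep, pvChain, ih, PySem.Set.mem_add, List.mem_cons]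
      tauto

theorem pvMem_prefixFold_none (parts : List String) (s : PySem.Set String) (x : String) :
    x ∈ (parts.foldl pvPrefixStep (s, none)).1 ↔ x ∈ s ∨ x ∈ pvChainStart parts := by
  cases parts with
  | nil => simp [pvChainStart]
  | cons p ps =>
      simp only [List.foldl_cons, pvPrefixStep, pvChainStart, pvMem_prefixFold_some,
        PySem.Set.mem_add, List.mem_cons]
      tauto

-- membership in A's aux frozenset, indexed by the prefix length k+1
theorem pvMem_auxA (v x : String) :
    x ∈ pvAuxA v ↔
      ∃ k : Nat, k + 1 < (pvComps v).length ∧ x ∈ pvThree (pvJoinDot ((pvComps v).take (k+1))) := by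
  simp only [pvAuxA, pvComps, PySem.Set.mem_ofList, PySem.List.foldl_append_eq_flatMap, List.nil_append,
    List.mem_flatMap, PySem.List.mem_pyRange_one]
  constructor
  · rintro ⟨i, ⟨h1, h2⟩, hx⟩
    refine ⟨i.toNat - 1, by omega, ?_⟩
    have hi : (0:Int) ≤ i := by omega
    have : i.toNat - 1 + 1 = i.toNat := by omega
    rw [this]
    rw [PySem.List.slice_to _ hi] at hx
    simpa [pvThree, pvComps, pvJoinDot, pvDotStar] using hx
  · rintro ⟨k, hk, hx⟩
    refine ⟨(k+1 : Nat), ⟨by omega, by exact_mod_cast hk⟩, ?_⟩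
    rw [PySem.List.slice_to _ (by omega)]
    simpa [pvThree, pvComps, pvJoinDot, pvDotStar] using hx

-- membership in the proper-prefix chain of a value, same indexing
theorem pvMem_chainStart (v p : String) :
    p ∈ pvChainStart ((pvComps v).dropLast) ↔
      ∃ k : Nat, k + 1 < (pvComps v).length ∧ p = pvJoinDot ((pvComps v).take (k+1)) := by
  rw [pvChainStart_eq]
  simp only [List.mem_map, List.mem_range, List.length_dropLast]
  constructor
  · rintro ⟨i, hi, rfl⟩
    refine ⟨i, by omega, ?_⟩
    rw [List.dropLast_eq_take, List.take_take]
    congr 2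
    omega
  · rintro ⟨k, hk, rfl⟩
    refine ⟨k, by omega, ?_⟩
    rw [List.dropLast_eq_take, List.take_take]
    congr 2
    omega

-- A's accumulating fold, membership and nodup
theorem pvMem_foldA (vs : List String) (s : PySem.Set String) (x : String) :
    x ∈ vs.foldl (fun specs value => PySem.Set.union (PySem.Set.add specs value) (pvAuxA value)) s ↔
      x ∈ s ∨ ∃ v ∈ vs, x = v ∨ x ∈ pvAuxA v := by
  induction vs generalizing s with
  | nil => simp
  | cons v vs ih =>
      simp only [List.foldl_cons, ih, PySem.Set.mem_union, PySem.Set.mem_add, List.mem_cons]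
      constructor
      · rintro (((h | h) | h) | ⟨w, hw, h⟩)
        · exact Or.inl h
        · exact Or.inr ⟨v, Or.inl rfl, Or.inl h⟩
        · exact Or.inr ⟨v, Or.inl rfl, Or.inr h⟩
        · exact Or.inr ⟨w, Or.inr hw, h⟩
      · rintro (h | ⟨w, (rfl | hw), h⟩)
        · exact Or.inl (Or.inl (Or.inl h))
        · rcases h with h | h
          · exact Or.inl (Or.inl (Or.inr h))
          · exact Or.inl (Or.inr h)
        · exact Or.inr ⟨w, hw, h⟩

theorem pvNodup_foldA (vs : List String) (s : PySem.Set String) (h : s.Nodup) :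
    (vs.foldl (fun specs value => PySem.Set.union (PySem.Set.add specs value) (pvAuxA value)) s).Nodup := by
  induction vs generalizing s with
  | nil => exact h
  | cons v vs ih =>
      exact ih _ (PySem.Set.nodup_union _ _ (PySem.Set.nodup_add _ _ h))

-- B's prefix-collecting fold, membership and nodup
theorem pvMem_foldB (vs : List String) (s : PySem.Set String) (x : String) :
    x ∈ vs.foldl
        (fun prefixes value =>
          ((((PySem.Str.split? value ".").getD []).dropLast.foldl pvPrefixStep (prefixes, none)).1))
        s ↔
      x ∈ s ∨ ∃ v ∈ vs, x ∈ pvChainStart ((pvComps v).dropLast) := by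
  induction vs generalizing s with
  | nil => simp
  | cons v vs ih =>
      simp only [List.foldl_cons, ih, pvMem_prefixFold_none, List.mem_cons, pvComps]
      constructor
      · rintro ((h | h) | ⟨w, hw, h⟩)
        · exact Or.inl h
        · exact Or.inr ⟨v, Or.inl rfl, h⟩
        · exact Or.inr ⟨w, Or.inr hw, h⟩
      · rintro (h | ⟨w, (rfl | hw), h⟩)
        · exact Or.inl (Or.inl h)
        · exact Or.inl (Or.inr h)
        · exact Or.inr ⟨w, hw, h⟩

-- the two spec sets coincide as sets
theorem pvMem_main (vs : List String) (x : String) :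
    x ∈ vs.foldl (fun specs value => PySem.Set.union (PySem.Set.add specs value) (pvAuxA value))
        PySem.Set.empty ↔
      x ∈ PySem.Set.union (PySem.Set.ofList vs)
        (PySem.Set.ofList
          ((vs.foldl
              (fun prefixes value =>
                ((((PySem.Str.split? value ".").getD []).dropLast.foldl pvPrefixStep
                    (prefixes, none)).1))
              PySem.Set.empty).flatMap (fun p => [p, p ++ "*", p ++ ".*"]))) := by
  rw [pvMem_foldA, PySem.Set.mem_union, PySem.Set.mem_ofList, PySem.Set.mem_ofList,
    List.mem_flatMap]
  have hempty : x ∈ (PySem.Set.empty : PySem.Set String) ↔ False := by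
    simp [PySem.Set.empty]
  constructor
  · rintro (h | ⟨v, hv, h | h⟩)
    · exact absurd h (fun hh => hempty.mp hh)
    · exact Or.inl (h ▸ hv)
    · rw [pvMem_auxA] at h
      obtain ⟨k, hk, hx⟩ := h
      refine Or.inr ⟨pvJoinDot ((pvComps v).take (k+1)), ?_, by simpa [pvThree] using hx⟩
      rw [pvMem_foldB]
      exact Or.inr ⟨v, hv, (pvMem_chainStart v _).mpr ⟨k, hk, rfl⟩⟩
  · rintro (h | ⟨p, hp, hx⟩)
    · exact Or.inr ⟨x, h, Or.inl rfl⟩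
    · rw [pvMem_foldB] at hp
      rcases hp with hp | ⟨v, hv, hp⟩
      · exact absurd hp (fun hh => by simp [PySem.Set.empty] at hh)
      · rw [pvMem_chainStart] at hp
        obtain ⟨k, hk, rfl⟩ := hp
        refine Or.inr ⟨v, hv, Or.inr ?_⟩
        rw [pvMem_auxA]
        exact ⟨k, hk, by simpa [pvThree] using hx⟩

-- ===== VERDICT (by name: the statement is the Claim_ definition above) =====
theorem get_string_annotation_archive_value_specs_py_spec : Claim_equal_get_string_annotation_archive_value_specs_py := by
  intro vs _
  show _ = _
  unfold get_string_annotation_archive_value_specs_py get_string_annotation_archive_value_specs_py_alt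
  simp only []
  congr 1
  rw [PySem.List.sorted_id_eq_sorted_id_iff_perm]
  rw [List.perm_ext_iff_of_nodup (pvNodup_foldA _ _ (by simp [PySem.Set.empty]))
    (PySem.Set.nodup_union _ _ (PySem.Set.nodup_ofList _))]
  intro x
  exact pvMem_main vs x
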